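-- pv_equiv track=rewrite | github.com/Prajjwal98Dubey/DSA-Algorithms | cses/searching and sorting/towers.py | solve
-- ===== SOURCE A (Python) =====
-- def solve(nums):
--   res = []
--   def bs(target,arr):
--     l,r = 0,len(arr)-1
--     while l<=r:
--       mid=  (l+r)//2
--       if arr[mid] > target:
--         r= mid-1
--       else:
--         l = mid+1
--     return l
--   for n in nums:
--     if not res:
--       res.append(n)
--     else:
--       index= bs(n,res)
--       if index < len(res):
--         res[index] = n
--       else:
--         res.append(n)
--   return len(res)
-- ===== SOURCE B (Python) =====
-- def solve(nums):
--   res = []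
--   for n in nums:
--     for i, v in enumerate(res):
--       if v > n:
--         res[i] = n
--         break
--     else:
--       res.append(n)
--   return len(res)
-- ===== Notes on version B (the rewrite author's own statement) =====
-- stated objective: simpler
-- what changed: Replaces the hand-written binary-search helper (with its l/r index arithmetic and guarded replace/append) by a single left-to-right scan that overwrites the first pile top strictly greater than n or appends; pile replacement and the final count are identical because the pile-top list is always sorted.
import Mathlib
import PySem

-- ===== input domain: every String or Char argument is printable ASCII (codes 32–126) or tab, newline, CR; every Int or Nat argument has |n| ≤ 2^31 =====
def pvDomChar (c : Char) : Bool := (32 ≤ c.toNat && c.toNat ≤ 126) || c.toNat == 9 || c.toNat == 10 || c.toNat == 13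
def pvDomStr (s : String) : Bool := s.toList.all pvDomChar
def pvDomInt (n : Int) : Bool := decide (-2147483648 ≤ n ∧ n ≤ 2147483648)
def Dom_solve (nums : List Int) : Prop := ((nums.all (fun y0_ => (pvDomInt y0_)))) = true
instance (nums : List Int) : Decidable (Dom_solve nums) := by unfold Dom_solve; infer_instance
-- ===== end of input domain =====

-- B replaces A's hand-written binary-search helper by a single left-to-right scan for the
-- first pile top strictly greater than n (simpler; same return value).

-- ===== PORT A =====
-- A's inner `bs` while-loop; the `none` branch = IndexError, unreachable in A's use since mid stays in [l,r] ⊆ [0,len)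
def bsAux (target : Int) (arr : List Int) (l r : Int) : Int :=
  if _hcond : l ≤ r then
    let mid := PySem.Int.floordiv (l + r) 2
    match PySem.List.pyGet? arr mid with
    | some v => if v > target then bsAux target arr l (mid - 1) else bsAux target arr (mid + 1) r
    | none => l
  else l
termination_by (r + 1 - l).toNat
decreasing_by
  all_goals
    have := PySem.Int.floordiv_two_mid_bounds _hcond
    omega

-- A's loop body; the index returned by bs is provably ≥ 0, so `.toNat` is exact for res[index] = n
def stepA (res : List Int) (n : Int) : List Int :=
  if res = [] then res ++ [n]
  else
    let index := bsAux n res 0 ((res.length : Int) - 1)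
    if index < (res.length : Int) then res.set index.toNat n
    else res ++ [n]

def solve (nums : List Int) : Int :=
  ((nums.foldl stepA []).length : Int)

-- ===== PORT B =====
-- B's inner for/else scan: replace the first pile top strictly greater than n, else append
def placeScan (res : List Int) (n : Int) : List Int :=
  match res with
  | [] => [n]
  | v :: rest => if v > n then n :: rest else v :: placeScan rest n

def solve_alt (nums : List Int) : Int :=
  ((nums.foldl placeScan []).length : Int)

-- ===== PRECONDITION & SPEC =====
def Spec_solve (nums : List Int) (out : Int) : Prop := out = solve_alt nums
instance (nums : List Int) (out : Int) : Decidable (Spec_solve nums out) := by unfold Spec_solve; infer_instance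

-- ===== CLAIM (what is proved, stated in full; the proofs are below) =====
def Claim_equal_solve : Prop := ∀ (nums : List Int), Dom_solve nums → Spec_solve nums (solve nums)

-- ===== LEMMAS AND PROOFS =====

-- Binary-search convergence: if indices below t hold values ≤ target and indices from t
-- upwards hold values > target, the loop converges to t.
theorem bsAux_eq (target : Int) (arr : List Int) (t : Nat)
    (hle : ∀ i (h : i < arr.length), i < t → arr[i] ≤ target)
    (hgt : ∀ i (h : i < arr.length), t ≤ i → target < arr[i]) :
    ∀ k (l r : Int), (r + 1 - l).toNat ≤ k → 0 ≤ l → l ≤ (t : Int) → (t : Int) ≤ r + 1 →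
      r < (arr.length : Int) → bsAux target arr l r = t := by
  intro k
  induction k with
  | zero =>
    intro l r hk h0 hlt htr hr
    rw [bsAux]
    have hnl : ¬ l ≤ r := by omega
    simp only [hnl, dite_false]
    omega
  | succ k ih =>
    intro l r hk h0 hlt htr hr
    rw [bsAux]
    by_cases hlr : l ≤ r
    · simp only [hlr, dite_true]
      have hmid := PySem.Int.floordiv_two_mid_bounds hlr
      set mid := PySem.Int.floordiv (l + r) 2 with hmiddef
      have hmid0 : 0 ≤ mid := by omega
      have hmidlen : mid.toNat < arr.length := by omega
      rw [PySem.List.pyGet?_of_nonneg _ hmid0, List.getElem?_eq_getElem hmidlen]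
      by_cases hv : arr[mid.toNat] > target
      · have htm : (t : Int) ≤ mid := by
          by_contra hc
          have h1 := hle mid.toNat hmidlen (by omega)
          omega
        simp only [hv, if_true]
        exact ih l (mid - 1) (by omega) h0 hlt (by omega) (by omega)
      · have htm : mid < (t : Int) := by
          by_contra hc
          have h1 := hgt mid.toNat hmidlen (by omega)
          omega
        simp only [hv, if_false]
        exact ih (mid + 1) r (by omega) (by omega) (by omega) htr hr
    · simp only [hlr, dite_false]
      omega

-- placeScan in takeWhile/dropWhile form (no sortedness needed)
theorem placeScan_repr (res : List Int) (n : Int) :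
    placeScan res n =
      res.takeWhile (fun v => decide (v ≤ n)) ++
        (match res.dropWhile (fun v => decide (v ≤ n)) with
         | [] => [n]
         | _ :: tl => n :: tl) := by
  induction res with
  | nil => simp [placeScan]
  | cons v rest ih =>
    by_cases hv : v > n
    · have hnle : ¬ v ≤ n := by omega
      simp [placeScan, hv, hnle]
    · have hle : v ≤ n := by omega
      simp [placeScan, hv, hle, ih]

theorem mem_placeScan {res : List Int} {n x : Int} (hx : x ∈ placeScan res n) :
    x = n ∨ x ∈ res := by
  induction res with
  | nil => simpa [placeScan] using hx
  | cons v rest ih =>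
    by_cases hv : v > n
    · simp only [placeScan, hv, if_true] at hx
      rcases List.mem_cons.mp hx with h | h
      · exact Or.inl h
      · exact Or.inr (List.mem_cons_of_mem _ h)
    · simp only [placeScan, hv, if_false] at hx
      rcases List.mem_cons.mp hx with h | h
      · exact Or.inr (by simp [h])
      · rcases ih h with h' | h'
        · exact Or.inl h'
        · exact Or.inr (List.mem_cons_of_mem _ h')

theorem sorted_placeScan {res : List Int} (n : Int)
    (hs : List.Pairwise (· ≤ ·) res) : List.Pairwise (· ≤ ·) (placeScan res n) := by
  induction res with
  | nil => simp [placeScan]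
  | cons v rest ih =>
    rw [List.pairwise_cons] at hs
    obtain ⟨hv_all, hrest⟩ := hs
    by_cases hv : v > n
    · simp only [placeScan, hv, if_true]
      exact List.pairwise_cons.mpr ⟨fun y hy => le_trans (le_of_lt hv) (hv_all y hy), hrest⟩
    · simp only [placeScan, hv, if_false]
      refine List.pairwise_cons.mpr ⟨fun y hy => ?_, ih hrest⟩
      rcases mem_placeScan hy with h | h
      · omega
      · exact hv_all y h

-- the A-step equals the B-step on a sorted pile-top list
theorem stepA_eq_placeScan {res : List Int} (n : Int)
    (hs : List.Pairwise (· ≤ ·) res) : stepA res n = placeScan res n := by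
  by_cases hnil : res = []
  · subst hnil; simp [stepA, placeScan]
  · set p : Int → Bool := fun v => decide (v ≤ n) with hp
    set t : Nat := (res.takeWhile p).length with htdef
    have hsplit : res.takeWhile p ++ res.dropWhile p = res := List.takeWhile_append_dropWhile
    have hlen : t + (res.dropWhile p).length = res.length := by
      conv_rhs => rw [← hsplit]
      rw [List.length_append, htdef]
    have ht : t ≤ res.length := by omega
    have hpair := List.pairwise_iff_getElem.mp hs
    have hle : ∀ i (h : i < res.length), i < t → res[i] ≤ n := by
      intro i h hi
      have hget : (res.takeWhile p)[i]'(by omega) = res[i] :=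
        (List.takeWhile_prefix p).getElem (by omega)
      have hmem : res[i] ∈ res.takeWhile p := by
        rw [← hget]; exact List.getElem_mem _
      have := List.mem_takeWhile_imp hmem
      simpa [hp] using this
    have hgt : ∀ i (h : i < res.length), t ≤ i → n < res[i] := by
      intro i h hi
      rcases hdrop : res.dropWhile p with _ | ⟨d, tl⟩
      · rw [hdrop] at hlen; simp at hlen; omega
      · have hd : ¬ p d = true := by
          have := List.head_dropWhile_not p (l := res) (by simp [hdrop])
          simpa [hdrop] using this
        have hdn : n < d := by simpa [hp] using hd
        have hres : res = res.takeWhile p ++ d :: tl := by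
          conv_lhs => rw [← hsplit, hdrop]
        have hdt : res[t]'(by omega) = d := by
          rw [List.getElem_of_eq hres, List.getElem_append_right (by omega)]
          simp [htdef]
        by_cases hit : i = t
        · subst hit; omega
        · have := hpair t i (by omega) h (by omega)
          omega
    have hbs : bsAux n res 0 ((res.length : Int) - 1) = t :=
      bsAux_eq n res t hle hgt ((res.length : Int) - 1 + 1 - 0).toNat 0
        ((res.length : Int) - 1) (le_refl _) (by omega) (by omega) (by omega) (by omega)
    rw [placeScan_repr, ← hp]
    simp only [stepA, hnil, if_false, hbs]
    by_cases hcase : ((t : Int) : Int) < (res.length : Int)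
    · simp only [hcase, if_true, Int.toNat_natCast]
      rcases hdrop : res.dropWhile p with _ | ⟨d, tl⟩
      · rw [hdrop] at hlen; simp at hlen; omega
      · have hres : res = res.takeWhile p ++ d :: tl := by
          conv_lhs => rw [← hsplit, hdrop]
        conv_lhs => rw [hres]
        rw [List.set_append]
        simp [htdef]
    · simp only [hcase, if_false]
      have hdropnil : res.dropWhile p = [] :=
        List.eq_nil_iff_length_eq_zero.mpr (by omega)
      have htake : res.takeWhile p = res := by
        conv_rhs => rw [← hsplit, hdropnil]
        simp
      rw [hdropnil, htake]

theorem foldl_stepA_eq (nums : List Int) :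
    ∀ res, List.Pairwise (· ≤ ·) res → nums.foldl stepA res = nums.foldl placeScan res := by
  induction nums with
  | nil => intro res _; rfl
  | cons n rest ih =>
    intro res hs
    simp only [List.foldl_cons, stepA_eq_placeScan n hs]
    exact ih _ (sorted_placeScan n hs)

-- ===== VERDICT (by name: the statement is the Claim_ definition above) =====
theorem solve_spec : Claim_equal_solve := by
  intro nums _
  unfold Spec_solve solve solve_alt
  rw [foldl_stepA_eq nums [] List.Pairwise.nil]
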